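-- pv_equiv track=rewrite | github.com/tarunganesh2004/GFG | 2025/July/13th_july.py | maxSumNotInLIS
-- ===== SOURCE A (Python) =====
-- def maxSumNotInLIS(arr):
--     n=len(arr)
--     dp=[1]*n
--     for i in range(1,n):
--         for j in range(i):
--             if arr[i]>arr[j]:
--                 dp[i]=max(dp[i],dp[j]+1)
--     max_lis_length = max(dp)
--     cur_len=max_lis_length
--     lis=[]
--     for i in range(n-1,-1,-1):
--         if dp[i]==cur_len:
--             lis.append(arr[i])
--             cur_len-=1
--     lis=lis[::-1]
--     return sum(arr) - sum(lis)
-- ===== SOURCE B (Python) =====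
-- def maxSumNotInLIS(arr):
--     # Patience sorting: dp[i] = LIS-length ending at i via binary search on tails,
--     # then the same right-to-left reconstruction, accumulating the sum directly.
--     tails = []
--     dp = []
--     for x in arr:
--         lo, hi = 0, len(tails)
--         while lo < hi:
--             mid = (lo + hi) // 2
--             if tails[mid] < x:
--                 lo = mid + 1
--             else:
--                 hi = mid
--         dp.append(lo + 1)
--         if lo == len(tails):
--             tails.append(x)
--         else:
--             tails[lo] = x
--     cur = len(tails)
--     s = 0
--     for i in range(len(arr) - 1, -1, -1):
--         if dp[i] == cur:
--             s += arr[i]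
--             cur -= 1
--     return sum(arr) - s
-- ===== Notes on version B (the rewrite author's own statement) =====
-- stated objective: faster
-- what changed: Replaces the quadratic nested-loop LIS dp with patience sorting (binary search on a 'tails' array gives each index's LIS-ending length), keeping the same right-to-left reconstruction but accumulating the sum directly instead of building and reversing a list.
import Mathlib
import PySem

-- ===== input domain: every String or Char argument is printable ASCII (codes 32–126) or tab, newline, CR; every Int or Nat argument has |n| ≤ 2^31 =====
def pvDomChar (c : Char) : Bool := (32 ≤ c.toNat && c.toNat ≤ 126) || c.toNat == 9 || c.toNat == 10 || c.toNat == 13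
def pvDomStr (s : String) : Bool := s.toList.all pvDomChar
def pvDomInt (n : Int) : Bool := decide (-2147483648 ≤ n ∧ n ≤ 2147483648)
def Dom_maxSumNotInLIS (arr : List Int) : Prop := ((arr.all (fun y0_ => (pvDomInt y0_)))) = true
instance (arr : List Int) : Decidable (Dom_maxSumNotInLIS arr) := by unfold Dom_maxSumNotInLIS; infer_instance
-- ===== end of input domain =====

-- B replaces A's quadratic nested-loop LIS dp with patience sorting (binary search on a
-- tails array), keeping the same right-to-left reconstruction; measured asymptotically faster.


-- ===== PORT A =====
def maxSumNotInLIS (arr : List Int) : Int :=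
  let n : Int := (arr.length : Int)
  let dp : List Int :=
    (PySem.List.pyRange 1 n 1).foldl (fun dp i =>
      (PySem.List.pyRange 0 i 1).foldl (fun dp j =>
        if PySem.List.pyGetD arr i 0 > PySem.List.pyGetD arr j 0 then
          PySem.List.pySetD dp i (max (PySem.List.pyGetD dp i 0) (PySem.List.pyGetD dp j 0 + 1))
        else dp) dp)
      (List.replicate arr.length 1)
  -- max(dp): Python raises ValueError on an empty list; Pre_ excludes arr = [], the .getD 0 is never used
  let maxLis : Int := (PySem.List.max? dp (fun y => y)).getD 0
  let lisCur : List Int × Int :=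
    (PySem.List.pyRange (n - 1) (-1) (-1)).foldl (fun (lc : List Int × Int) i =>
      if PySem.List.pyGetD dp i 0 = lc.2 then (lc.1 ++ [PySem.List.pyGetD arr i 0], lc.2 - 1) else lc)
      ([], maxLis)
  let lis : List Int := (PySem.List.slice? lisCur.1 none none (-1)).getD []   -- lis[::-1]
  arr.sum - lis.sum

-- ===== PORT B =====
-- the hand-written bisect_left while-loop of Source B
def pvBisectLoop (tails : List Int) (x lo hi : Int) : Int :=
  if _h : lo < hi then
    let mid := PySem.Int.floordiv (lo + hi) 2
    if PySem.List.pyGetD tails mid 0 < x then pvBisectLoop tails x (mid + 1) hi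
    else pvBisectLoop tails x lo mid
  else lo
termination_by (hi - lo).toNat
decreasing_by
  · have hb := PySem.Int.floordiv_two_mid_bounds (lo := lo) (hi := hi) (by omega)
    omega
  · have h1 := PySem.Int.floordiv_two_mid_bounds (lo := lo) (hi := hi) (by omega)
    have h2 : PySem.Int.floordiv (lo + hi) 2 < hi := by
      rw [PySem.Int.floordiv_lt_iff_lt_mul (by omega)]; omega
    omega

def maxSumNotInLIS_alt (arr : List Int) : Int :=
  let td : List Int × List Int :=
    arr.foldl (fun td x =>
      let lo := pvBisectLoop td.1 x 0 (td.1.length : Int)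
      ((if lo = (td.1.length : Int) then td.1 ++ [x] else PySem.List.pySetD td.1 lo x),
       td.2 ++ [lo + 1])) ([], [])
  let sc : Int × Int :=
    (PySem.List.pyRange ((arr.length : Int) - 1) (-1) (-1)).foldl (fun (sc : Int × Int) i =>
      if PySem.List.pyGetD td.2 i 0 = sc.2 then (sc.1 + PySem.List.pyGetD arr i 0, sc.2 - 1) else sc)
      (0, (td.1.length : Int))
  arr.sum - sc.1

-- ===== PRECONDITION & SPEC =====
-- Pre_ excludes only the empty list, on which Python A raises ValueError (max() of empty dp).
def Pre_maxSumNotInLIS (arr : List Int) : Prop := arr ≠ []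
instance (arr : List Int) : Decidable (Pre_maxSumNotInLIS arr) := by unfold Pre_maxSumNotInLIS; infer_instance
def pvWitness_maxSumNotInLIS : List Int := [1, 3, 2]

def Spec_maxSumNotInLIS (arr : List Int) (out : Int) : Prop := out = maxSumNotInLIS_alt arr
instance (arr : List Int) (out : Int) : Decidable (Spec_maxSumNotInLIS arr out) := by unfold Spec_maxSumNotInLIS; infer_instance

-- ===== CLAIM (what is proved, stated in full; the proofs are below) =====
def Claim_equal_maxSumNotInLIS : Prop := ∀ (arr : List Int), Dom_maxSumNotInLIS arr → Pre_maxSumNotInLIS arr → Spec_maxSumNotInLIS arr (maxSumNotInLIS arr)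

-- ===== LEMMAS AND PROOFS =====

-- spec-side recurrence: pvBestLt P x = max dp among processed pairs with value < x (0 if none);
-- pvPairs l = list of (value, LIS-length-ending-here) pairs; pvDp l its dp column
def pvBestLt (P : List (Int × Int)) (x : Int) : Int :=
  P.foldl (fun m p => if p.1 < x then max m p.2 else m) 0

def pvPairs (l : List Int) : List (Int × Int) :=
  l.foldl (fun P x => P ++ [(x, pvBestLt P x + 1)]) []

def pvDp (l : List Int) : List Int := (pvPairs l).map Prod.snd

-- the elements taken by the right-to-left reconstruction pass, given the dp column
def pvPick (dp arr : List Int) : List Int → Int → List Int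
  | [], _ => []
  | i :: R, c =>
    if PySem.List.pyGetD dp i 0 = c then PySem.List.pyGetD arr i 0 :: pvPick dp arr R (c - 1)
    else pvPick dp arr R c

lemma pvPairs_append (l : List Int) (x : Int) :
    pvPairs (l ++ [x]) = pvPairs l ++ [(x, pvBestLt (pvPairs l) x + 1)] := by
  simp [pvPairs, List.foldl_append]

lemma pvBestLt_append (P : List (Int × Int)) (p : Int × Int) (y : Int) :
    pvBestLt (P ++ [p]) y = if p.1 < y then max (pvBestLt P y) p.2 else pvBestLt P y := by
  simp [pvBestLt, List.foldl_append]

lemma pvBestLt_init_le (P : List (Int × Int)) (x m : Int) :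
    m ≤ P.foldl (fun m p => if p.1 < x then max m p.2 else m) m := by
  induction P generalizing m with
  | nil => simp
  | cons p P ih =>
    simp only [List.foldl_cons]
    exact le_trans (by split <;> simp) (ih _)

lemma pvBestLt_nonneg (P : List (Int × Int)) (x : Int) : 0 ≤ pvBestLt P x :=
  pvBestLt_init_le P x 0

lemma pvPairs_map_fst (l : List Int) : (pvPairs l).map Prod.fst = l := by
  induction l using List.reverseRecOn with
  | nil => rfl
  | append_singleton l x ih => rw [pvPairs_append]; simp [ih]

lemma pvPairs_length (l : List Int) : (pvPairs l).length = l.length := by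
  have h := congrArg List.length (pvPairs_map_fst l); simpa using h

lemma pvDp_length (l : List Int) : (pvDp l).length = l.length := by
  simp [pvDp, pvPairs_length]

lemma pvDp_append (l : List Int) (x : Int) :
    pvDp (l ++ [x]) = pvDp l ++ [pvBestLt (pvPairs l) x + 1] := by
  simp [pvDp, pvPairs_append]

lemma pvDp_one_le (l : List Int) : ∀ d ∈ pvDp l, 1 ≤ d := by
  induction l using List.reverseRecOn with
  | nil => simp [pvDp, pvPairs]
  | append_singleton l x ih =>
    intro d hd
    rw [pvDp_append] at hd
    rcases List.mem_append.mp hd with h | h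
    · exact ih d h
    · have := pvBestLt_nonneg (pvPairs l) x
      simp at h; omega

-- ---- A-side: indexing helpers around position D.length ----
lemma pvGet_mid (D R : List Int) (c : Int) :
    PySem.List.pyGetD (D ++ c :: R) (D.length : Int) 0 = c := by
  rw [PySem.List.pyGetD_natCast]
  simp [List.getD_eq_getElem?_getD]

lemma pvGet_left (D R : List Int) (c j : Int) (h0 : 0 ≤ j) (hj : j < (D.length : Int)) :
    PySem.List.pyGetD (D ++ c :: R) j 0 = PySem.List.pyGetD D j 0 := by
  rw [PySem.List.pyGetD_eq_getElem (D ++ c :: R) 0 h0 (by simp; omega),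
      PySem.List.pyGetD_eq_getElem D 0 h0 hj,
      List.getElem_append_left (by omega)]

lemma pvSet_mid (D R : List Int) (c v : Int) :
    PySem.List.pySetD (D ++ c :: R) (D.length : Int) v = D ++ v :: R := by
  rw [PySem.List.pySetD_natCast]
  simp

lemma pvInnerShape (arr D R : List Int) (x : Int) (js : List Int)
    (hjs : ∀ j ∈ js, 0 ≤ j ∧ j < (D.length : Int)) : ∀ c : Int,
    js.foldl (fun dp j =>
        if x > PySem.List.pyGetD arr j 0 then
          PySem.List.pySetD dp (D.length : Int)
            (max (PySem.List.pyGetD dp (D.length : Int) 0) (PySem.List.pyGetD dp j 0 + 1))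
        else dp) (D ++ c :: R)
    = D ++ (js.foldl (fun c j =>
        if x > PySem.List.pyGetD arr j 0 then max c (PySem.List.pyGetD D j 0 + 1) else c) c) :: R := by
  induction js with
  | nil => intro c; rfl
  | cons j js ih =>
    intro c
    have hj := hjs j (by simp)
    simp only [List.foldl_cons]
    rw [pvGet_mid, pvGet_left D R c j hj.1 hj.2]
    by_cases h : x > PySem.List.pyGetD arr j 0
    · rw [if_pos h, pvSet_mid, ih (fun j hj => hjs j (by simp [hj])), if_pos h]
    · rw [if_neg h, ih (fun j hj => hjs j (by simp [hj])), if_neg h]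

lemma pvPlusOne (q : Int → Prop) [DecidablePred q] (g : Int → Int) (js : List Int) : ∀ c : Int,
    js.foldl (fun c j => if q j then max c (g j + 1) else c) (c + 1)
    = (js.foldl (fun c j => if q j then max c (g j) else c) c) + 1 := by
  induction js with
  | nil => intro c; rfl
  | cons j js ih =>
    intro c
    simp only [List.foldl_cons]
    by_cases h : q j
    · rw [if_pos h, if_pos h, max_add_add_right, ih]
    · rw [if_neg h, if_neg h, ih]

lemma pvIndexFold (arr : List Int) (k : Nat) (hk : k ≤ arr.length) (x : Int) :
    (PySem.List.pyRange 0 (k : Int) 1).foldl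
      (fun m j => if x > PySem.List.pyGetD arr j 0 then max m (PySem.List.pyGetD (pvDp (arr.take k)) j 0) else m) 0
    = pvBestLt (pvPairs (arr.take k)) x := by
  have hlenP : (pvPairs (arr.take k)).length = k := by
    rw [pvPairs_length, List.length_take]; omega
  rw [pvBestLt]
  rw [← PySem.List.foldl_pyRange_zero_pyGetD' (pvPairs (arr.take k)) ((0 : Int), (0 : Int))
        (fun m p => if p.1 < x then max m p.2 else m) 0, hlenP]
  apply PySem.List.foldl_congr_mem
  intro m j hj
  rw [PySem.List.mem_pyRange_one] at hj
  have hfst : (PySem.List.pyGetD (pvPairs (arr.take k)) j ((0:Int),(0:Int))).1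
      = PySem.List.pyGetD arr j 0 := by
    have h1 := PySem.List.pyGetD_map Prod.fst (pvPairs (arr.take k)) j ((0:Int),(0:Int))
    rw [pvPairs_map_fst] at h1
    rw [← h1]
    rw [PySem.List.pyGetD_eq_getElem (arr.take k) 0 hj.1 (by rw [List.length_take]; push_cast; omega),
        PySem.List.pyGetD_eq_getElem arr 0 hj.1 (by omega),
        List.getElem_take]
  have hsnd : (PySem.List.pyGetD (pvPairs (arr.take k)) j ((0:Int),(0:Int))).2
      = PySem.List.pyGetD (pvDp (arr.take k)) j 0 := by
    have h2 := PySem.List.pyGetD_map Prod.snd (pvPairs (arr.take k)) j ((0:Int),(0:Int))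
    rw [show (pvPairs (arr.take k)).map Prod.snd = pvDp (arr.take k) from rfl] at h2
    exact h2.symm
  rw [← hfst, ← hsnd]

lemma pvOuterInv (arr : List Int) : ∀ k : Nat, 1 ≤ k → k ≤ arr.length →
    (PySem.List.pyRange 1 (k : Int) 1).foldl (fun dp i =>
      (PySem.List.pyRange 0 i 1).foldl (fun dp j =>
        if PySem.List.pyGetD arr i 0 > PySem.List.pyGetD arr j 0 then
          PySem.List.pySetD dp i (max (PySem.List.pyGetD dp i 0) (PySem.List.pyGetD dp j 0 + 1))
        else dp) dp) (List.replicate arr.length 1)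
    = pvDp (arr.take k) ++ List.replicate (arr.length - k) 1 := by
  intro k hk1
  induction k, hk1 using Nat.le_induction with
  | base =>
    intro hlen
    rw [Nat.cast_one, PySem.List.pyRange_one_eq_nil (le_refl 1), List.foldl_nil]
    cases arr with
    | nil => simp at hlen
    | cons a t =>
      show List.replicate (t.length + 1) (1:Int) = pvDp [a] ++ List.replicate ((a :: t).length - 1) 1
      rw [List.replicate_succ]
      rfl
  | succ k hk1 ih =>
    intro hlen
    push_cast
    rw [PySem.List.pyRange_one_succ_right (by exact_mod_cast hk1), List.foldl_append,
        ih (by omega)]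
    have hrep : List.replicate (arr.length - k) (1:Int)
        = 1 :: List.replicate (arr.length - (k+1)) 1 := by
      rw [show arr.length - k = (arr.length - (k+1)) + 1 by omega, List.replicate_succ]
    rw [hrep]
    simp only [List.foldl_cons, List.foldl_nil]
    have hD : (pvDp (arr.take k)).length = k := by
      rw [pvDp_length, List.length_take]; omega
    have hDk : ((pvDp (arr.take k)).length : Int) = (k : Int) := by exact_mod_cast hD
    rw [← hDk]
    rw [pvInnerShape arr (pvDp (arr.take k)) (List.replicate (arr.length - (k+1)) 1)
          (PySem.List.pyGetD arr ((pvDp (arr.take k)).length : Int) 0)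
          (PySem.List.pyRange 0 ((pvDp (arr.take k)).length : Int) 1)
          (fun j hj => by rw [PySem.List.mem_pyRange_one] at hj; exact hj) 1]
    rw [hDk]
    have hkl : k < arr.length := by omega
    have htake : arr.take (k+1) = arr.take k ++ [arr[k]] := by
      rw [List.take_add_one, List.getElem?_eq_getElem hkl]
      rfl
    rw [htake, pvDp_append]
    have hx : PySem.List.pyGetD arr (k : Int) 0 = arr[k] := by
      rw [PySem.List.pyGetD_natCast, List.getD_eq_getElem?_getD, List.getElem?_eq_getElem hkl]
      rfl
    have hp1 := pvPlusOne (fun j => PySem.List.pyGetD arr (k:Int) 0 > PySem.List.pyGetD arr j 0)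
          (fun j => PySem.List.pyGetD (pvDp (arr.take k)) j 0)
          (PySem.List.pyRange 0 (k : Int) 1) 0
    rw [show (0:Int) + 1 = 1 from rfl] at hp1
    rw [hp1, pvIndexFold arr k (by omega) (PySem.List.pyGetD arr (k:Int) 0), hx]
    simp [List.append_assoc]

-- ---- B-side ----
lemma pvSortedCount (t : List Int) (x : Int) (hs : t.Pairwise (· ≤ ·)) :
    ∀ k : Nat, (hk : k < t.length) → (t[k] < x ↔ k < t.countP (fun v => v < x)) := by
  induction t with
  | nil => intro k hk; simp at hk
  | cons a t ih =>
    have ha := List.pairwise_cons.mp hs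
    intro k hk
    by_cases hax : a < x
    · have : List.countP (fun v => decide (v < x)) (a :: t)
          = List.countP (fun v => decide (v < x)) t + 1 := by
        rw [List.countP_cons]; simp [hax]
      rw [this]
      cases k with
      | zero => simpa using hax
      | succ k =>
        have := ih ha.2 k (by simpa using hk)
        simpa using this
    · have hz : List.countP (fun v => decide (v < x)) t = 0 := by
        rw [List.countP_eq_zero]
        intro b hb
        simp only [decide_eq_true_eq]
        have := ha.1 b hb
        omega
      have : List.countP (fun v => decide (v < x)) (a :: t) = 0 := by
        rw [List.countP_cons]; simp [hax, hz]
      rw [this]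
      cases k with
      | zero => simpa using hax
      | succ k =>
        simp only [List.getElem_cons_succ]
        have hb := ha.1 (t[k]'(by simpa using hk)) (List.getElem_mem _)
        constructor
        · intro h; omega
        · intro h; omega

lemma pvBisect_eq (t : List Int) (x : Int) (hs : t.Pairwise (· ≤ ·)) : ∀ lo hi : Int,
    0 ≤ lo → lo ≤ (t.countP (fun v => v < x) : Int) →
    (t.countP (fun v => v < x) : Int) ≤ hi → hi ≤ (t.length : Int) →
    pvBisectLoop t x lo hi = (t.countP (fun v => v < x) : Int) := by
  intro lo hi
  induction lo, hi using pvBisectLoop.induct t x with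
  | case1 lo hi hlt mid hmid ih =>
    intro h0 h1 h2 h3
    have hb := PySem.Int.floordiv_two_mid_bounds (lo := lo) (hi := hi) (by omega)
    have hlt2 : PySem.Int.floordiv (lo + hi) 2 < hi := by
      rw [PySem.Int.floordiv_lt_iff_lt_mul (by omega)]; omega
    have hmr : mid = PySem.Int.floordiv (lo + hi) 2 := rfl
    rw [pvBisectLoop, dif_pos hlt, ← hmr, if_pos hmid]
    have hmn : mid.toNat < t.length := by omega
    have hget : PySem.List.pyGetD t mid 0 = t[mid.toNat] := by
      exact PySem.List.pyGetD_eq_getElem t 0 (by omega) (by omega)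
    have hc := (pvSortedCount t x hs mid.toNat hmn).mp (by rw [← hget]; exact hmid)
    exact ih (by omega) (by omega) h2 h3
  | case2 lo hi hlt mid hmid ih =>
    intro h0 h1 h2 h3
    have hb := PySem.Int.floordiv_two_mid_bounds (lo := lo) (hi := hi) (by omega)
    have hlt2 : PySem.Int.floordiv (lo + hi) 2 < hi := by
      rw [PySem.Int.floordiv_lt_iff_lt_mul (by omega)]; omega
    have hmr : mid = PySem.Int.floordiv (lo + hi) 2 := rfl
    rw [pvBisectLoop, dif_pos hlt, ← hmr, if_neg hmid]
    have hmn : mid.toNat < t.length := by omega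
    have hget : PySem.List.pyGetD t mid 0 = t[mid.toNat] := by
      exact PySem.List.pyGetD_eq_getElem t 0 (by omega) (by omega)
    have hc : ¬ (mid.toNat < t.countP (fun v => v < x)) := by
      intro hcc
      exact hmid (by rw [hget]; exact (pvSortedCount t x hs mid.toNat hmn).mpr hcc)
    exact ih (by omega) (by omega) (by omega) (by omega)
  | case3 lo hi hlt =>
    intro h0 h1 h2 h3
    rw [pvBisectLoop, dif_neg hlt]
    omega

lemma pvSortedSet (t : List Int) (x : Int) (hs : t.Pairwise (· ≤ ·))
    (hk : t.countP (fun v => v < x) < t.length) :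
    (t.set (t.countP (fun v => v < x)) x).Pairwise (· ≤ ·) := by
  set c := t.countP (fun v => v < x) with hc
  rw [List.pairwise_iff_getElem]
  intro i j hi hj hij
  rw [List.length_set] at hi hj
  have hg := List.pairwise_iff_getElem.mp hs
  rw [List.getElem_set, List.getElem_set]
  by_cases hci : c = i
  · rw [if_pos hci, if_neg (by omega)]
    have : ¬ (j < c) := by omega
    have hnj : ¬ (t[j] < x) := fun hlt => this ((pvSortedCount t x hs j hj).mp hlt)
    omega
  · rw [if_neg hci]
    by_cases hcj : c = j
    · rw [if_pos hcj]
      have : i < c := by omega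
      have := (pvSortedCount t x hs i hi).mpr (by omega)
      omega
    · rw [if_neg hcj]
      exact hg i j hi hj hij

lemma pvSortedAppend (t : List Int) (x : Int) (hs : t.Pairwise (· ≤ ·))
    (hall : t.countP (fun v => v < x) = t.length) :
    (t ++ [x]).Pairwise (· ≤ ·) := by
  rw [List.pairwise_append]
  refine ⟨hs, by simp, ?_⟩
  intro a ha b hb
  rw [List.mem_singleton] at hb
  subst hb
  have := List.countP_eq_length.mp hall a ha
  simp only [decide_eq_true_eq] at this
  omega

lemma pvCountSet (t : List Int) (x y : Int) (hs : t.Pairwise (· ≤ ·))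
    (hk : t.countP (fun v => v < x) < t.length) :
    ((t.set (t.countP (fun v => v < x)) x).countP (fun v => v < y) : Int)
    = if x < y then max ((t.countP (fun v => v < x) : Int) + 1) (t.countP (fun v => v < y) : Int)
      else (t.countP (fun v => v < y) : Int) := by
  set c := t.countP (fun v => v < x) with hc
  have hdec : t.set c x = t.take c ++ x :: t.drop (c + 1) := by
    rw [List.set_eq_take_append_cons_drop, if_pos hk]
  have htdec : t = t.take c ++ t[c] :: t.drop (c + 1) := by
    conv_lhs => rw [← List.take_append_drop c t]
    rw [List.drop_eq_getElem_cons hk]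
  have hlen : (t.take c).length = c := by rw [List.length_take]; omega
  have htlt : ∀ a ∈ t.take c, a < x := by
    intro a ha
    obtain ⟨p, hp, hpe⟩ := List.mem_iff_getElem.mp ha
    have hp' : p < c := by omega
    rw [List.getElem_take] at hpe
    subst hpe
    exact (pvSortedCount t x hs p (by omega)).mpr (by rw [← hc]; omega)
  have hgec : x ≤ t[c] := by
    have := (pvSortedCount t x hs c hk)
    rw [← hc] at this
    have h2 : ¬ (t[c] < x) := fun hlt => by omega
    omega
  have hdrop : ∀ a ∈ t.drop (c + 1), t[c] ≤ a := by
    intro a ha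
    obtain ⟨q, hq, hqe⟩ := List.mem_iff_getElem.mp ha
    rw [List.length_drop] at hq
    rw [List.getElem_drop] at hqe
    subst hqe
    exact List.pairwise_iff_getElem.mp hs c (c + 1 + q) hk (by omega) (by omega)
  have hty : t.countP (fun v => v < y)
      = (t.take c).countP (fun v => v < y) + ((if t[c] < y then 1 else 0) + (t.drop (c + 1)).countP (fun v => v < y)) := by
    conv_lhs => rw [htdec]
    rw [List.countP_append, List.countP_cons]
    simp only [decide_eq_true_eq]
    omega
  have hsy : (t.set c x).countP (fun v => v < y)
      = (t.take c).countP (fun v => v < y) + ((if x < y then 1 else 0) + (t.drop (c + 1)).countP (fun v => v < y)) := by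
    rw [hdec, List.countP_append, List.countP_cons]
    simp only [decide_eq_true_eq]
    omega
  by_cases hxy : x < y
  · have h1 : (t.take c).countP (fun v => v < y) = c := by
      have h2 : (t.take c).countP (fun v => v < y) = (t.take c).length :=
        List.countP_eq_length.mpr (fun a ha => by
          simp only [decide_eq_true_eq]
          have := htlt a ha
          omega)
      rw [h2, hlen]
    by_cases hcy : t[c] < y
    · rw [if_pos hxy]
      rw [hsy, hty, h1, if_pos hxy, if_pos hcy]
      push_cast
      omega
    · have hcd : (t.drop (c + 1)).countP (fun v => v < y) = 0 := by
        rw [List.countP_eq_zero]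
        intro a ha
        simp only [decide_eq_true_eq]
        have := hdrop a ha
        omega
      rw [if_pos hxy, hsy, hty, h1, if_pos hxy, if_neg hcy, hcd]
      push_cast
      omega
  · have hcy : ¬ (t[c] < y) := by omega
    rw [if_neg hxy, hsy, hty, if_neg hxy, if_neg hcy]

lemma pvCountAppend (t : List Int) (x y : Int) (_hs : t.Pairwise (· ≤ ·))
    (hall : t.countP (fun v => v < x) = t.length) :
    (((t ++ [x]).countP (fun v => v < y)) : Int)
    = if x < y then max ((t.countP (fun v => v < x) : Int) + 1) (t.countP (fun v => v < y) : Int)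
      else (t.countP (fun v => v < y) : Int) := by
  rw [List.countP_append]
  by_cases hxy : x < y
  · have hy : t.countP (fun v => v < y) = t.length := by
      rw [List.countP_eq_length]
      intro a ha
      have := List.countP_eq_length.mp hall a ha
      simp only [decide_eq_true_eq] at this ⊢
      omega
    rw [if_pos hxy]
    simp [hxy, hall, hy]
  · rw [if_neg hxy]
    simp [hxy]

def pvStepB (td : List Int × List Int) (x : Int) : List Int × List Int :=
  let lo := pvBisectLoop td.1 x 0 (td.1.length : Int)
  ((if lo = (td.1.length : Int) then td.1 ++ [x] else PySem.List.pySetD td.1 lo x),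
   td.2 ++ [lo + 1])

lemma pvBInv (l : List Int) :
    (l.foldl pvStepB ([], [])).1.Pairwise (· ≤ ·)
    ∧ (l.foldl pvStepB ([], [])).2 = pvDp l
    ∧ (((l.foldl pvStepB ([], [])).1.length : Int) = (pvDp l).foldl max 0)
    ∧ ∀ y : Int, (((l.foldl pvStepB ([], [])).1.countP (fun v => v < y) : Int))
        = pvBestLt (pvPairs l) y := by
  induction l using List.reverseRecOn with
  | nil =>
    refine ⟨by simp, rfl, by simp [pvDp, pvPairs], ?_⟩
    intro y; simp [pvBestLt, pvPairs]
  | append_singleton l x ih =>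
    obtain ⟨hsor, hdp, hlenmax, hcnt⟩ := ih
    simp only [List.foldl_append, List.foldl_cons, List.foldl_nil] at *
    rcases hF : l.foldl pvStepB ([], []) with ⟨t, d⟩
    rw [hF] at hsor hdp hlenmax hcnt
    simp only at hsor hdp hlenmax hcnt
    have hlo : pvBisectLoop t x 0 (t.length : Int) = (t.countP (fun v => v < x) : Int) :=
      pvBisect_eq t x hsor 0 (t.length : Int) (le_refl 0) (by positivity)
        (by exact_mod_cast List.countP_le_length) (le_refl _)
    set c := t.countP (fun v => v < x) with hcc
    have hbx : (c : Int) = pvBestLt (pvPairs l) x := hcnt x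
    simp only [pvStepB]
    rw [hlo]
    by_cases hc : (c : Int) = (t.length : Int)
    · have hcl : c = t.length := by exact_mod_cast hc
      rw [if_pos hc]
      refine ⟨pvSortedAppend t x hsor hcl, ?_, ?_, ?_⟩
      · rw [pvDp_append, hdp, ← hbx]
      · rw [pvDp_append, List.foldl_append, List.foldl_cons, List.foldl_nil, ← hbx]
        simp only [List.length_append, List.length_cons, List.length_nil]
        push_cast
        omega
      · intro y
        rw [pvCountAppend t x y hsor hcl, pvPairs_append, pvBestLt_append,
            ← hbx, ← hcnt y]
        split_ifs <;> simp [max_comm, ← hcc]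
    · have hclt : c < t.length := by
        have := List.countP_le_length (l := t) (p := fun v => decide (v < x))
        omega
      rw [if_neg hc, PySem.List.pySetD_natCast]
      refine ⟨pvSortedSet t x hsor hclt, ?_, ?_, ?_⟩
      · rw [pvDp_append, hdp, ← hbx]
      · rw [pvDp_append, List.foldl_append, List.foldl_cons, List.foldl_nil, ← hbx,
            List.length_set]
        omega
      · intro y
        rw [pvCountSet t x y hsor hclt, pvPairs_append, pvBestLt_append,
            ← hbx, ← hcnt y]
        split_ifs <;> simp [max_comm, ← hcc]

-- ---- reconstruction ----
lemma pvPickA (dp arr : List Int) (R : List Int) : ∀ (l0 : List Int) (c : Int),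
    (R.foldl (fun (lc : List Int × Int) i =>
      if PySem.List.pyGetD dp i 0 = lc.2 then (lc.1 ++ [PySem.List.pyGetD arr i 0], lc.2 - 1) else lc)
      (l0, c)).1
    = l0 ++ pvPick dp arr R c := by
  induction R with
  | nil => intro l0 c; simp [pvPick]
  | cons i R ih =>
    intro l0 c
    simp only [List.foldl_cons, pvPick]
    by_cases h : PySem.List.pyGetD dp i 0 = c
    · rw [if_pos h, if_pos h, ih]
      simp
    · rw [if_neg h, if_neg h, ih]

lemma pvPickB (dp arr : List Int) (R : List Int) : ∀ (s0 : Int) (c : Int),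
    (R.foldl (fun (sc : Int × Int) i =>
      if PySem.List.pyGetD dp i 0 = sc.2 then (sc.1 + PySem.List.pyGetD arr i 0, sc.2 - 1) else sc)
      (s0, c)).1
    = s0 + (pvPick dp arr R c).sum := by
  induction R with
  | nil => intro s0 c; simp [pvPick]
  | cons i R ih =>
    intro s0 c
    simp only [List.foldl_cons, pvPick]
    by_cases h : PySem.List.pyGetD dp i 0 = c
    · rw [if_pos h, if_pos h, ih]
      simp only [List.sum_cons]
      ring
    · rw [if_neg h, if_neg h, ih]

lemma pvMaxLis (arr : List Int) (h : arr ≠ []) :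
    (PySem.List.max? (pvDp arr) (fun y => y)).getD 0 = (pvDp arr).foldl max 0 := by
  have hne : pvDp arr ≠ [] := by
    intro he
    have := pvDp_length arr
    rw [he] at this
    simp at this
    exact h (List.length_eq_zero_iff.mp this.symm)
  obtain ⟨d0, rest, hde⟩ := List.exists_cons_of_ne_nil hne
  have h1 : 1 ≤ d0 := pvDp_one_le arr d0 (by rw [hde]; simp)
  rw [hde, PySem.List.max?_id_cons, Option.getD_some, List.foldl_cons,
      show max 0 d0 = d0 by omega]

-- ===== VERDICT (by name: the statement is the Claim_ definition above) =====
theorem maxSumNotInLIS_spec : Claim_equal_maxSumNotInLIS := by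
  intro arr hdom hpre
  unfold Spec_maxSumNotInLIS maxSumNotInLIS maxSumNotInLIS_alt
  dsimp only
  have hlen : 1 ≤ arr.length := by
    cases arr with
    | nil => exact absurd rfl hpre
    | cons a t => simp
  have hdpA := pvOuterInv arr arr.length hlen (le_refl _)
  rw [List.take_length] at hdpA
  simp only [Nat.sub_self, List.replicate_zero, List.append_nil] at hdpA
  rw [hdpA]
  rw [show (fun (td : List Int × List Int) x =>
      ((if pvBisectLoop td.1 x 0 (td.1.length : Int) = (td.1.length : Int) then td.1 ++ [x]
        else PySem.List.pySetD td.1 (pvBisectLoop td.1 x 0 (td.1.length : Int)) x),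
       td.2 ++ [pvBisectLoop td.1 x 0 (td.1.length : Int) + 1])) = pvStepB from rfl]
  obtain ⟨hsor, hdp, hlenmax, hcnt⟩ := pvBInv arr
  rcases hF : arr.foldl pvStepB ([], []) with ⟨t, d⟩
  rw [hF] at hsor hdp hlenmax hcnt
  dsimp only at hsor hdp hlenmax hcnt ⊢
  rw [hdp, pvMaxLis arr hpre, ← hlenmax]
  rw [pvPickA (pvDp arr) arr (PySem.List.pyRange ((arr.length : Int) - 1) (-1) (-1)) [] (t.length : Int),
      pvPickB (pvDp arr) arr (PySem.List.pyRange ((arr.length : Int) - 1) (-1) (-1)) 0 (t.length : Int),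
      PySem.List.slice?_none_none_neg_one, Option.getD_some, List.sum_reverse]
  simp
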